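-- pv_equiv track=rewrite | github.com/ellethykhaled/Regex-Analyser | req_1.py | squareBracketContentsValidation
-- ===== SOURCE A (Python) =====
-- def squareBracketContentsValidation(regex):
--     if len(regex) == 0 or (len(regex) == 1 and regex[0] == '^'):
--         return False
--     index = 0
--     dash_indices = []
--     for c in regex:
--         if index == 1 and c == '-' and regex[0] == '^':
--             index += 1
--             continue
--         if c == '-' and index > 0 and index < len(regex) - 1:
--             if len(dash_indices) > 0:
--                 old_index = dash_indices[-1]
--                 if index == old_index + 1 or index == old_index + 2:
--                     index += 1
--                     continue
--             dash_indices.append(index)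
--         index += 1
--     for dash_index in dash_indices:
--         if regex[dash_index - 1] > regex[dash_index + 1]:
--             return False
--     return True
-- ===== SOURCE B (Python) =====
-- def squareBracketContentsValidation(regex):
--     n = len(regex)
--     if n == 0 or regex == '^':
--         return False
--     i = 1
--     while i < n - 1:
--         if regex[i] == '-':
--             if i == 1 and regex[0] == '^':
--                 i += 1
--             else:
--                 if regex[i - 1] > regex[i + 1]:
--                     return False
--                 i += 3
--         else:
--             i += 1
--     return True
-- ===== Notes on version B (the rewrite author's own statement) =====
-- stated objective: alternative
-- what changed: Replaced A's two-pass design (collect dash indices into a list, then validate them in a second loop) by a single index-driven while loop with no list: an accepted range dash is checked on the spot and the scan jumps three positions ahead, which subsumes the consecutive-dash skip rule and exits early on the first violation.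
import Mathlib
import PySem

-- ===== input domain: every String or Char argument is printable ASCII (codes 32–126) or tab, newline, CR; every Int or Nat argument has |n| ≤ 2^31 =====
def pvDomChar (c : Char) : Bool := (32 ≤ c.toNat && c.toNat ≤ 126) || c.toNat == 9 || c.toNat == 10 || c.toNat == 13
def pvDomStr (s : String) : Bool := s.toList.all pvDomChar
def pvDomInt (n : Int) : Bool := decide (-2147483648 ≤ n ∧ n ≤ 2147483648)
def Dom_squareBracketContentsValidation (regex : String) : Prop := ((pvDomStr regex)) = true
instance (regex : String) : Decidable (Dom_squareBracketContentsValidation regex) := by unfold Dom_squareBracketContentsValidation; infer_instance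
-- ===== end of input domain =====

-- ===== PORT A =====
-- B replaces A's collect-then-validate two-pass design by a single stride-jumping scan (objective: alternative).
-- loop body of A's first for-loop, as a fold step over (index, dash_indices)
def pvStepA (s : List Char) (st : Nat × List Nat) (c : Char) : Nat × List Nat :=
  if st.1 == 1 && c == '-' && s.getD 0 ' ' == '^' then (st.1 + 1, st.2)
  else if c == '-' && decide (0 < st.1) && decide (st.1 < s.length - 1) then
    match st.2.getLast? with
    | some old =>
      if st.1 == old + 1 || st.1 == old + 2 then (st.1 + 1, st.2)
      else (st.1 + 1, st.2 ++ [st.1])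
    | none => (st.1 + 1, st.2 ++ [st.1])
  else (st.1 + 1, st.2)

-- body of A's second for-loop: the ordering check at one dash index
def pvChk (s : List Char) (d : Nat) : Bool :=
  !(decide (s.getD (d - 1) ' ' > s.getD (d + 1) ' '))

def squareBracketContentsValidation (regex : String) : Bool :=
  if regex.toList.length == 0 || (regex.toList.length == 1 && regex.toList.getD 0 ' ' == '^')
  then false
  else (regex.toList.foldl (pvStepA regex.toList) (0, [])).2.all (pvChk regex.toList)

-- ===== PORT B =====
-- Source B's while loop: i is the scan index; after accepting a range dash at i the scan jumps to i+3
def pvAltLoop (s : List Char) (n : Nat) (i : Nat) : Bool :=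
  if i < n - 1 then
    if s.getD i ' ' == '-' then
      if i == 1 && s.getD 0 ' ' == '^' then pvAltLoop s n (i + 1)
      else if decide (s.getD (i - 1) ' ' > s.getD (i + 1) ' ') then false
      else pvAltLoop s n (i + 3)
    else pvAltLoop s n (i + 1)
  else true
termination_by n - i
decreasing_by all_goals omega

def squareBracketContentsValidation_alt (regex : String) : Bool :=
  if regex.toList.length == 0 || regex.toList == ['^'] then false
  else pvAltLoop regex.toList regex.toList.length 1

-- ===== PRECONDITION & SPEC =====
def Spec_squareBracketContentsValidation (regex : String) (out : Bool) : Prop := out = squareBracketContentsValidation_alt regex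
instance (regex : String) (out : Bool) : Decidable (Spec_squareBracketContentsValidation regex out) := by unfold Spec_squareBracketContentsValidation; infer_instance

-- ===== CLAIM (what is proved, stated in full; the proofs are below) =====
def Claim_equal_squareBracketContentsValidation : Prop := ∀ (regex : String), Dom_squareBracketContentsValidation regex → Spec_squareBracketContentsValidation regex (squareBracketContentsValidation regex)

-- ===== LEMMAS AND PROOFS =====

-- the dash indices A's first loop appends while scanning suffix l from index i, given the last appended dash
def pvRun (s : List Char) (l : List Char) (i : Nat) (last : Option Nat) : List Nat :=
  match l with
  | [] => []
  | c :: t =>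
    if i == 1 && c == '-' && s.getD 0 ' ' == '^' then pvRun s t (i + 1) last
    else if c == '-' && decide (0 < i) && decide (i < s.length - 1) then
      match last with
      | some old =>
        if i == old + 1 || i == old + 2 then pvRun s t (i + 1) last
        else i :: pvRun s t (i + 1) (some i)
      | none => i :: pvRun s t (i + 1) (some i)
    else pvRun s t (i + 1) last

lemma pvFold_run (s : List Char) : ∀ (l : List Char) (i : Nat) (di : List Nat),
    l.foldl (pvStepA s) (i, di) = (i + l.length, di ++ pvRun s l i di.getLast?) := by
  intro l
  induction l with
  | nil => intro i di; simp [pvRun]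
  | cons c t ih =>
    intro i di
    rw [List.foldl_cons]
    cases hl : di.getLast? with
    | none =>
      rw [pvRun]
      by_cases h1 : (i == 1 && c == '-' && s.getD 0 ' ' == '^') = true
      · have hstep : pvStepA s (i, di) c = (i + 1, di) := by
          simp only [pvStepA]
          rw [if_pos h1]
        rw [hstep, if_pos h1, ih, hl]
        congr 1
        simp only [List.length_cons]
        omega
      · by_cases h2 : (c == '-' && decide (0 < i) && decide (i < s.length - 1)) = true
        · have hstep : pvStepA s (i, di) c = (i + 1, di ++ [i]) := by
            simp only [pvStepA, hl]
            rw [if_neg h1, if_pos h2]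
          rw [hstep, if_neg h1, if_pos h2, ih, List.getLast?_concat]
          refine Prod.ext (by simp; omega) ?_
          simp
        · have hstep : pvStepA s (i, di) c = (i + 1, di) := by
            simp only [pvStepA]
            rw [if_neg h1, if_neg h2]
          rw [hstep, if_neg h1, if_neg h2, ih, hl]
          congr 1
          simp only [List.length_cons]
          omega
    | some old =>
      rw [pvRun]
      by_cases h1 : (i == 1 && c == '-' && s.getD 0 ' ' == '^') = true
      · have hstep : pvStepA s (i, di) c = (i + 1, di) := by
          simp only [pvStepA]
          rw [if_pos h1]
        rw [hstep, if_pos h1, ih, hl]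
        congr 1
        simp only [List.length_cons]
        omega
      · by_cases h2 : (c == '-' && decide (0 < i) && decide (i < s.length - 1)) = true
        · by_cases h3 : (i == old + 1 || i == old + 2) = true
          · have hstep : pvStepA s (i, di) c = (i + 1, di) := by
              simp only [pvStepA, hl]
              rw [if_neg h1, if_pos h2, if_pos h3]
            rw [hstep, if_neg h1, if_pos h2, if_pos h3, ih, hl]
            congr 1
            simp only [List.length_cons]
            omega
          · have hstep : pvStepA s (i, di) c = (i + 1, di ++ [i]) := by
              simp only [pvStepA, hl]
              rw [if_neg h1, if_pos h2, if_neg h3]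
            rw [hstep, if_neg h1, if_pos h2, if_neg h3, ih, List.getLast?_concat]
            refine Prod.ext (by simp; omega) ?_
            simp
        · have hstep : pvStepA s (i, di) c = (i + 1, di) := by
            simp only [pvStepA]
            rw [if_neg h1, if_neg h2]
          rw [hstep, if_neg h1, if_neg h2, ih, hl]
          congr 1
          simp only [List.length_cons]
          omega

lemma pvRun_nil_of_ge (s : List Char) : ∀ (l : List Char) (i : Nat) (last : Option Nat),
    s.length - 1 ≤ i → pvRun s l i last = [] := by
  intro l
  induction l with
  | nil => intro i last _; simp [pvRun]
  | cons c t ih =>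
    intro i last h
    have hlt : decide (i < s.length - 1) = false := by simp; omega
    simp only [pvRun, hlt, Bool.and_false]
    split
    · exact ih _ _ (by omega)
    · simp; exact ih _ _ (by omega)

lemma pvRun_none_of_far (s : List Char) : ∀ (l : List Char) (i d : Nat),
    d + 3 ≤ i → pvRun s l i (some d) = pvRun s l i none := by
  intro l
  induction l with
  | nil => intro i d _; simp [pvRun]
  | cons c t ih =>
    intro i d h
    simp only [pvRun]
    split
    · exact ih _ _ (by omega)
    · split
      · have h3 : (i == d + 1 || i == d + 2) = false := by simp; omega
        simp [h3]
      · exact ih _ _ (by omega)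

lemma pvAbsorb (s : List Char) (j i : Nat) (hij : i < j) (hj : j ≤ i + 2) :
    pvRun s (s.drop j) j (some i) = pvRun s (s.drop (j + 1)) (j + 1) (some i) := by
  by_cases hn : j < s.length
  · rw [List.drop_eq_getElem_cons hn]
    simp only [pvRun]
    split
    · rfl
    · split
      · have h3 : (j == i + 1 || j == i + 2) = true := by simp; omega
        simp [h3]
      · rfl
  · rw [List.drop_eq_nil_of_le (by omega), List.drop_eq_nil_of_le (by omega)]
    simp [pvRun]

lemma pvMain (s : List Char) : ∀ (k i : Nat), k = s.length - i → 1 ≤ i →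
    (pvRun s (s.drop i) i none).all (pvChk s) = pvAltLoop s s.length i := by
  intro k
  induction k using Nat.strong_induction_on with
  | _ k ih =>
    intro i hk hi
    by_cases hend : i < s.length - 1
    · have hin : i < s.length := by omega
      rw [List.drop_eq_getElem_cons hin]
      have hget : s.getD i ' ' = s[i] := by simp [List.getD_eq_getElem?_getD, hin]
      rw [pvAltLoop]
      simp only [hend, if_pos]
      by_cases hdash : (s[i] == '-') = true
      · by_cases hcar : (i == 1 && s.getD 0 ' ' == '^') = true
        · -- literal dash right after '^'
          have hb1 : (i == 1 && s[i] == '-' && s.getD 0 ' ' == '^') = true := by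
            simp_all
          have hrun : pvRun s (s[i] :: List.drop (i + 1) s) i none
              = pvRun s (List.drop (i + 1) s) (i + 1) none := by
            rw [pvRun, if_pos hb1]
          rw [hrun, hget, if_pos hdash, if_pos hcar]
          exact ih (s.length - (i + 1)) (by omega) (i + 1) rfl (by omega)
        · -- accepted range dash at i
          have hb1 : (i == 1 && s[i] == '-' && s.getD 0 ' ' == '^') = false := by
            by_cases hi1 : i = 1
            · subst hi1
              simp_all
            · have h : (i == 1) = false := by simp [hi1]
              simp [h]
          have hb2 : (s[i] == '-' && decide (0 < i) && decide (i < s.length - 1)) = true := by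
            simp_all; omega
          have hrun : pvRun s (s[i] :: List.drop (i + 1) s) i none
              = i :: pvRun s (List.drop (i + 1) s) (i + 1) (some i) := by
            rw [pvRun, if_neg (by rw [hb1]; exact Bool.false_ne_true), if_pos hb2]
          rw [hrun, List.all_cons, hget, if_pos hdash, if_neg hcar]
          by_cases hviol : decide (s.getD (i - 1) ' ' > s.getD (i + 1) ' ') = true
          · rw [if_pos hviol]
            have hchk : pvChk s i = false := by
              unfold pvChk
              rw [hviol]
              rfl
            rw [hchk, Bool.false_and]
          · rw [if_neg hviol]
            have hchk : pvChk s i = true := by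
              unfold pvChk
              simp at hviol ⊢
              exact hviol
            rw [hchk, Bool.true_and]
            rw [pvAbsorb s (i + 1) i (by omega) (by omega),
                pvAbsorb s (i + 2) i (by omega) (by omega),
                pvRun_none_of_far s _ _ _ (by omega)]
            exact ih (s.length - (i + 3)) (by omega) (i + 3) rfl (by omega)
      · -- not a dash
        have hb1 : (i == 1 && s[i] == '-' && s.getD 0 ' ' == '^') = false := by
          simp_all
        have hb2 : (s[i] == '-' && decide (0 < i) && decide (i < s.length - 1)) = false := by
          simp_all
        have hrun : pvRun s (s[i] :: List.drop (i + 1) s) i none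
            = pvRun s (List.drop (i + 1) s) (i + 1) none := by
          rw [pvRun, if_neg (by rw [hb1]; exact Bool.false_ne_true), if_neg (by rw [hb2]; exact Bool.false_ne_true)]
        rw [hrun, hget, if_neg hdash]
        exact ih (s.length - (i + 1)) (by omega) (i + 1) rfl (by omega)
    · rw [pvRun_nil_of_ge s _ _ _ (by omega), pvAltLoop]
      simp [hend]

-- ===== VERDICT (by name: the statement is the Claim_ definition above) =====
theorem squareBracketContentsValidation_spec : Claim_equal_squareBracketContentsValidation := by
  intro regex _
  unfold Spec_squareBracketContentsValidation squareBracketContentsValidation squareBracketContentsValidation_alt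
  cases hs : regex.toList with
  | nil => simp
  | cons c t =>
    by_cases hone : ((c :: t).length == 1 && (c :: t).getD 0 ' ' == '^') = true
    · have h2 : t = [] ∧ c = '^' := by
        simp at hone; exact ⟨by cases t <;> simp_all, hone.2⟩
      obtain ⟨ht, hc⟩ := h2
      subst ht hc
      simp
    · simp only [Bool.not_eq_true] at hone
      have hne : ((c :: t) == ['^']) = false := by
        cases t <;> simp_all
      rw [show ((c :: t).length == 0 || ((c :: t).length == 1 && (c :: t).getD 0 ' ' == '^'))
            = false from by rw [Bool.or_eq_false_iff]; exact ⟨by simp, hone⟩,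
          show ((c :: t).length == 0 || (c :: t) == ['^']) = false from by
            rw [Bool.or_eq_false_iff]; exact ⟨by simp, hne⟩]
      rw [if_neg Bool.false_ne_true, if_neg Bool.false_ne_true]
      rw [pvFold_run (c :: t) (c :: t) 0 []]
      have h0 : pvRun (c :: t) (c :: t) 0 none = pvRun (c :: t) t 1 none := by
        simp [pvRun]
      simpa [h0] using pvMain (c :: t) ((c :: t).length - 1) 1 rfl (by omega)
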